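-- pv_equiv track=rewrite | github.com/rwestgeest/luka-course | edx_course/module_3_word_magic.py | word_mixer
-- ===== SOURCE A (Python) =====
-- def word_mixer(listt):
--     listt.sort()
--     new_word=[]
--     while len(listt)>5:
--         new_word.append(listt.pop(-5))
--         new_word.append(listt.pop(0))
--         new_word.append(listt.pop(-1))
--     return(new_word)
-- ===== SOURCE B (Python) =====
-- def word_mixer(listt):
--     # One positional pass over the sorted list (return value only: the
--     # original mutates listt down to <= 5 elements, here it is just sorted).
--     # Each round of the original takes the 5th-from-last, the first and the
--     # last remaining element; precompute the three position streams instead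
--     # of re-shifting the list on every pop.
--     listt.sort()
--     n = len(listt)
--     k = max(0, (n - 3) // 3)                 # number of rounds
--     mids = [n - 5 - 2 * i for i in range(k)] # positions the 5th-from-last pop hits
--     taken = set(mids)
--     # the last pop always takes the highest position not already taken
--     highs = [j for j in range(n - 1, -1, -1) if j not in taken][:k]
--     out = []
--     for i in range(k):
--         out += [listt[mids[i]], listt[i], listt[highs[i]]]
--     return out
-- ===== Notes on version B (the rewrite author's own statement) =====
-- stated objective: faster
-- what changed: Replaces the quadratic pop-simulation loop (each pop shifts the list) by a single linear positional pass over the sorted list: it precomputes the three position streams per round (the 5th-from-last pops walk down by 2, the front pops walk up, and each last pop takes the highest position not already consumed by a 5th-from-last pop) and reads the answer directly.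
import Mathlib
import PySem

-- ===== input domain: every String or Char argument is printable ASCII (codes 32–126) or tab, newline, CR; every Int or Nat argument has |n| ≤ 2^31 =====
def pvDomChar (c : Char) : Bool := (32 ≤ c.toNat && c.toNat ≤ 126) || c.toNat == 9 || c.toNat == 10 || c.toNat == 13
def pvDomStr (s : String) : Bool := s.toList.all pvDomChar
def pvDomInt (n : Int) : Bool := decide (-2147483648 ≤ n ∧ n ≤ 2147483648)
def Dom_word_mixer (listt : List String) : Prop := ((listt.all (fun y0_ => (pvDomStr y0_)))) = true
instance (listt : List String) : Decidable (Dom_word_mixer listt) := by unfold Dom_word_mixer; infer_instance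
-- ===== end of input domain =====

-- B replaces A's quadratic pop-simulation loop by one linear positional pass over the
-- sorted list (faster). Return-value equivalence only: A also empties listt down to
-- ≤ 5 elements in place, B merely sorts it.

-- ===== PORT A =====
-- while len(listt)>5: new_word.append(listt.pop(-5)); …pop(0); …pop(-1)   (acc = new_word)
def wmLoop (l : List String) (acc : List String) : List String :=
  if h : 5 < l.length then
    match h5 : PySem.List.pop? l (-5) with
    | none => acc                                -- unreachable: len > 5
    | some (a, l1) =>
      match h0 : PySem.List.pop? l1 0 with
      | none => acc ++ [a]                       -- unreachable
      | some (b, l2) =>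
        match h1 : PySem.List.pop? l2 (-1) with
        | none => acc ++ [a, b]                  -- unreachable
        | some (c, l3) => wmLoop l3 (acc ++ [a, b, c])
  else acc
termination_by l.length
decreasing_by
  have e1 := PySem.List.length_of_pop?_eq_some _ h5
  have e2 := PySem.List.length_of_pop?_eq_some _ h0
  have e3 := PySem.List.length_of_pop?_eq_some _ h1
  simp only at e1 e2 e3
  omega

def word_mixer (listt : List String) : List String :=
  wmLoop (PySem.List.sorted listt (fun x => x) false) []

-- ===== PORT B =====
def word_mixer_alt (listt : List String) : List String :=
  let s := PySem.List.sorted listt (fun x => x) false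
  let n : Int := s.length
  let k : Int := max 0 (PySem.Int.floordiv (n - 3) 3)
  -- mids = [n - 5 - 2*i for i in range(k)]
  let mids := (PySem.List.pyRange 0 k 1).map (fun i => n - 5 - 2 * i)
  let taken := PySem.Set.ofList mids
  -- highs = [j for j in range(n-1, -1, -1) if j not in taken][:k]
  let highs := ((PySem.List.pyRange (n - 1) (-1) (-1)).filter
      (fun j => !(PySem.Set.contains taken j))).take k.toNat
  (PySem.List.pyRange 0 k 1).foldl
    (fun out i =>
      out ++ [PySem.List.pyGetD s (PySem.List.pyGetD mids i 0) "",
              PySem.List.pyGetD s i "",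
              PySem.List.pyGetD s (PySem.List.pyGetD highs i 0) ""]) []

-- ===== PRECONDITION & SPEC =====
def Spec_word_mixer (listt : List String) (out : List String) : Prop := out = word_mixer_alt listt
instance (listt : List String) (out : List String) : Decidable (Spec_word_mixer listt out) := by unfold Spec_word_mixer; infer_instance

-- ===== CLAIM (what is proved, stated in full; the proofs are below) =====
def Claim_equal_word_mixer : Prop := ∀ (listt : List String), Dom_word_mixer listt → Spec_word_mixer listt (word_mixer listt)

-- ===== LEMMAS AND PROOFS =====

-- the triple of positions read in round j, over a list of length m
def wmTriple (l : List String) (m j : Nat) : List String :=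
  [l.getD (m - 5 - 2 * j) "", l.getD j "",
   if j < 4 then l.getD (m - 1 - j) "" else l.getD (m + 2 - 2 * j) ""]

def wmBody (l : List String) : List String :=
  (List.range ((l.length - 3) / 3)).flatMap (wmTriple l l.length)

lemma pop?_neg_k (l : List String) (k : Nat) (h1 : 0 < k) (h2 : k ≤ l.length) :
    PySem.List.pop? l (-(k : Int)) =
      some (l.getD (l.length - k) "", l.eraseIdx (l.length - k)) := by
  have hidx : PySem.List.pyIdx? l.length (-(k : Int)) = some (l.length - k) := by
    simp only [PySem.List.pyIdx?]
    rw [if_neg (by omega), if_pos (by omega)]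
    congr 1; omega
  simp [PySem.List.pop?, hidx, List.getElem?_eq_getElem (by omega : l.length - k < l.length)]

lemma pop?_zero (l : List String) (h : 0 < l.length) :
    PySem.List.pop? l 0 = some (l.getD 0 "", l.tail) := by
  have hp := PySem.List.pop?_natCast l 0 h
  simp only [Nat.cast_zero] at hp
  rw [hp, List.eraseIdx_zero, List.getD_eq_getElem _ _ h]

lemma max_floordiv_eq (m : Nat) :
    max 0 (PySem.Int.floordiv ((m : Int) - 3) 3) = (((m - 3) / 3 : Nat) : Int) := by
  by_cases h : 3 ≤ m
  · have e : ((m : Int) - 3) = ((m - 3 : Nat) : Int) := by omega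
    have hf := PySem.Int.floordiv_natCast (m - 3) 3
    push_cast at hf
    rw [e, hf]; push_cast; omega
  · interval_cases m <;> decide

-- the Nat position stream behind B's filtered descending scan
def wmG (i : Nat) : Nat := if i < 4 then i else 2 * i - 3

-- below 2k+4 the descending scan keeps exactly the positions 0,1,2,3,5,7,…
lemma filter_range_core (k : Nat) :
    (List.range (2 * k + 4)).filter
        (fun t => !(decide (t % 2 = 0) && decide (4 ≤ t) && decide (t < 2 * k + 4))) =
      (List.range (k + 4)).map wmG := by
  induction k with
  | zero => decide
  | succ k ih =>
    have hsplit : List.range (2 * (k + 1) + 4) =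
        List.range (2 * k + 4) ++ [2 * k + 4, 2 * k + 5] := by
      have h : 2 * (k + 1) + 4 = (2 * k + 4) + 2 := by omega
      rw [h, List.range_add]
      rfl
    rw [hsplit, List.filter_append]
    have hcongr : (List.range (2 * k + 4)).filter
        (fun t => !(decide (t % 2 = 0) && decide (4 ≤ t) && decide (t < 2 * (k + 1) + 4))) =
        (List.range (2 * k + 4)).filter
        (fun t => !(decide (t % 2 = 0) && decide (4 ≤ t) && decide (t < 2 * k + 4))) := by
      refine List.filter_congr (fun t ht => ?_)
      rw [List.mem_range] at ht
      have h1 : decide (t < 2 * (k + 1) + 4) = true := by simp; omega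
      have h2 : decide (t < 2 * k + 4) = true := by simp; omega
      rw [h1, h2]
    rw [hcongr, ih]
    have htail : ([2 * k + 4, 2 * k + 5]).filter
        (fun t => !(decide (t % 2 = 0) && decide (4 ≤ t) && decide (t < 2 * (k + 1) + 4))) =
        [2 * k + 5] := by
      simp only [List.filter]
      have e1 : (!(decide ((2 * k + 4) % 2 = 0) && decide (4 ≤ 2 * k + 4) &&
          decide (2 * k + 4 < 2 * (k + 1) + 4))) = false := by
        simp only [Bool.not_eq_false', Bool.and_eq_true, decide_eq_true_eq]
        omega
      have e2 : (!(decide ((2 * k + 5) % 2 = 0) && decide (4 ≤ 2 * k + 5) &&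
          decide (2 * k + 5 < 2 * (k + 1) + 4))) = true := by
        simp only [Bool.not_eq_true', Bool.and_eq_false_iff, decide_eq_false_iff_not]
        omega
      rw [e1, e2]
    rw [htail]
    have hr : List.range (k + 1 + 4) = List.range (k + 4) ++ [k + 4] := List.range_succ
    rw [hr, List.map_append]
    congr 1

-- B's filtered-take list of last-pop positions, in closed form
lemma highs_eq (m kN : Nat) (h1 : 1 ≤ kN) (hmk : 3 * kN + 3 ≤ m) :
    (((PySem.List.pyRange ((m : Int) - 1) (-1) (-1)).filter
        (fun j => !(PySem.Set.contains
          (PySem.Set.ofList ((List.range kN).map (fun t : Nat => (m : Int) - 5 - 2 * (t : Int)))) j))).take kN)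
      = (List.range kN).map (fun t : Nat => (m : Int) - 1 - (wmG t : Int)) := by
  have hr : PySem.List.pyRange ((m : Int) - 1) (-1) (-1) =
      (List.range m).map (fun t : Nat => (m : Int) - 1 - (t : Int)) := by
    rw [PySem.List.pyRange_neg_one]
    have h2 : ((m : Int) - 1 - -1).toNat = m := by omega
    rw [h2]
  rw [hr, List.filter_map]
  have hpt : (List.range m).filter
      ((fun j => !(PySem.Set.contains
          (PySem.Set.ofList ((List.range kN).map (fun t : Nat => (m : Int) - 5 - 2 * (t : Int)))) j)) ∘
        (fun t : Nat => (m : Int) - 1 - (t : Int))) =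
      (List.range m).filter
        (fun t => !(decide (t % 2 = 0) && decide (4 ≤ t) && decide (t < 2 * kN + 4))) := by
    refine List.filter_congr (fun t _ => ?_)
    simp only [Function.comp, PySem.Set.contains_eq_decide]
    congr 1
    rw [← Bool.decide_and, ← Bool.decide_and, decide_eq_decide]
    rw [PySem.Set.mem_ofList, List.mem_map]
    constructor
    · rintro ⟨x, hx, he⟩
      rw [List.mem_range] at hx
      omega
    · rintro ⟨⟨hev, h4⟩, hlt⟩
      exact ⟨(t - 4) / 2, List.mem_range.mpr (by omega), by omega⟩
  rw [hpt]
  have hsplitm : List.range m =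
      List.range (2 * kN + 4) ++ (List.range (m - (2 * kN + 4))).map (fun x => 2 * kN + 4 + x) := by
    rw [← List.range_add]
    congr 1
    omega
  rw [hsplitm, List.filter_append, filter_range_core, List.map_append,
      List.take_append_of_le_length (by simp),
      ← List.map_take, ← List.map_take, List.take_range, Nat.min_eq_left (by omega),
      List.map_map]
  rfl

-- word_mixer_alt is wmBody of the sorted list
lemma alt_eq_wmBody (listt : List String) :
    word_mixer_alt listt = wmBody (PySem.List.sorted listt (fun x => x) false) := by
  unfold word_mixer_alt wmBody
  dsimp only
  set s := PySem.List.sorted listt (fun x => x) false with hs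
  set m := s.length with hm
  set kN := (m - 3) / 3 with hk
  rw [max_floordiv_eq, ← hk, PySem.List.pyRange_zero_natCast, Int.toNat_natCast]
  have hmids : ((List.range kN).map (fun k : Nat => (k : Int))).map
      (fun i => (m : Int) - 5 - 2 * i) = (List.range kN).map (fun t : Nat => (m : Int) - 5 - 2 * (t : Int)) := by
    rw [List.map_map]; rfl
  rw [hmids]
  by_cases hk0 : kN = 0
  · rw [hk0]
    simp
  · have h1 : 1 ≤ kN := by omega
    have hmk : 3 * kN + 3 ≤ m := by omega
    rw [highs_eq m kN h1 hmk,
        PySem.List.foldl_append_eq_flatMap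
          (g := fun i => [PySem.List.pyGetD s (PySem.List.pyGetD ((List.range kN).map (fun t : Nat => (m : Int) - 5 - 2 * (t : Int))) i 0) "",
                          PySem.List.pyGetD s i "",
                          PySem.List.pyGetD s (PySem.List.pyGetD ((List.range kN).map (fun t : Nat => (m : Int) - 1 - (wmG t : Int))) i 0) ""]),
        List.nil_append, List.flatMap_map]
    refine List.flatMap_congr (fun j hj => ?_)
    rw [List.mem_range] at hj
    have hb : 3 * j + 3 ≤ m := by omega
    have h6 : 6 ≤ m := by omega
    have hjm : 2 * j + 4 ≤ 2 * kN + 2 := by omega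
    -- the three indices, as Nat casts
    have gm : PySem.List.pyGetD ((List.range kN).map (fun t : Nat => (m : Int) - 5 - 2 * (t : Int))) (j : Int) 0
        = ((m - 5 - 2 * j : Nat) : Int) := by
      rw [PySem.List.pyGetD_natCast, PySem.List.getD_map_range _ _ _ _ hj]
      omega
    have gh : PySem.List.pyGetD ((List.range kN).map (fun t : Nat => (m : Int) - 1 - (wmG t : Int))) (j : Int) 0
        = (((if j < 4 then m - 1 - j else m + 2 - 2 * j) : Nat) : Int) := by
      rw [PySem.List.pyGetD_natCast, PySem.List.getD_map_range _ _ _ _ hj]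
      unfold wmG
      by_cases h4 : j < 4
      · rw [if_pos h4, if_pos h4]; omega
      · rw [if_neg h4, if_neg h4]; omega
    rw [gm, gh]
    unfold wmTriple
    simp only [PySem.List.pyGetD_natCast]
    by_cases h4 : j < 4
    · rw [if_pos h4, if_pos h4]
    · rw [if_neg h4, if_neg h4]

lemma l3_len (l : List String) (h6 : 6 ≤ l.length) :
    (((l.eraseIdx (l.length - 5)).tail).dropLast).length = l.length - 3 := by
  rw [List.length_dropLast, List.length_tail, List.length_eraseIdx, if_pos (by omega)]; omega

-- an element of the once-iterated list, in terms of the original list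
lemma l3_getD (l : List String) (h6 : 6 ≤ l.length) (j : Nat) (hj : j < l.length - 3) :
    (((l.eraseIdx (l.length - 5)).tail).dropLast).getD j "" =
      if j < l.length - 6 then l.getD (j + 1) "" else l.getD (j + 2) "" := by
  have hle : (l.eraseIdx (l.length - 5)).length = l.length - 1 := by
    rw [List.length_eraseIdx, if_pos (by omega)]
  have hlt : (l.eraseIdx (l.length - 5)).tail.length = l.length - 2 := by
    rw [List.length_tail, hle]; omega
  have hld : (((l.eraseIdx (l.length - 5)).tail).dropLast).length = l.length - 3 := by
    rw [List.length_dropLast, hlt]; omega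
  rw [List.getD_eq_getElem _ _ (by omega), List.getElem_dropLast, List.getElem_tail,
      List.getElem_eraseIdx]
  by_cases hc : j < l.length - 6
  · rw [dif_pos (by omega), if_pos hc, List.getD_eq_getElem _ _ (by omega)]
  · rw [dif_neg (by omega), if_neg hc, List.getD_eq_getElem _ _ (by omega)]

lemma wmTriple_shift (l : List String) (h6 : 6 ≤ l.length) (j : Nat)
    (hj : j + 1 < (l.length - 3) / 3) :
    wmTriple (((l.eraseIdx (l.length - 5)).tail).dropLast) (l.length - 3) j =
      wmTriple l l.length (j + 1) := by
  have hb : 3 * j + 6 ≤ l.length - 3 := by omega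
  unfold wmTriple
  have c1 : (((l.eraseIdx (l.length - 5)).tail).dropLast).getD (l.length - 3 - 5 - 2 * j) "" =
      l.getD (l.length - 5 - 2 * (j + 1)) "" := by
    rw [l3_getD l h6 _ (by omega), if_pos (by omega)]
    congr 1; omega
  have c2 : (((l.eraseIdx (l.length - 5)).tail).dropLast).getD j "" = l.getD (j + 1) "" := by
    rw [l3_getD l h6 _ (by omega), if_pos (by omega)]
  have c3 : (if j < 4 then (((l.eraseIdx (l.length - 5)).tail).dropLast).getD (l.length - 3 - 1 - j) ""
        else (((l.eraseIdx (l.length - 5)).tail).dropLast).getD (l.length - 3 + 2 - 2 * j) "") =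
      (if j + 1 < 4 then l.getD (l.length - 1 - (j + 1)) "" else l.getD (l.length + 2 - 2 * (j + 1)) "") := by
    by_cases h3 : j < 3
    · rw [if_pos (by omega), if_pos (by omega), l3_getD l h6 _ (by omega), if_neg (by omega)]
      congr 1; omega
    · by_cases h4 : j = 3
      · subst h4
        rw [if_pos (by omega), if_neg (by omega), l3_getD l h6 _ (by omega), if_pos (by omega)]
        congr 1; omega
      · rw [if_neg (by omega), if_neg (by omega), l3_getD l h6 _ (by omega), if_pos (by omega)]
        congr 1; omega
  rw [c1, c2, c3]

lemma wmBody_step (l : List String) (h6 : 6 ≤ l.length) :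
    wmBody l = wmTriple l l.length 0 ++ wmBody (((l.eraseIdx (l.length - 5)).tail).dropLast) := by
  unfold wmBody
  rw [l3_len l h6]
  have hk : (l.length - 3) / 3 = ((l.length - 3 - 3) / 3) + 1 := by omega
  rw [hk, List.range_succ_eq_map, List.flatMap_cons, List.flatMap_map]
  congr 1
  refine List.flatMap_congr (fun j hj => ?_)
  rw [List.mem_range] at hj
  exact (wmTriple_shift l h6 j (by omega)).symm

lemma wmBody_nil (l : List String) (h : ¬ 5 < l.length) : wmBody l = [] := by
  unfold wmBody
  rw [show (l.length - 3) / 3 = 0 by omega]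
  simp

lemma wmLoop_eq (l acc : List String) : wmLoop l acc = acc ++ wmBody l := by
  induction l, acc using wmLoop.induct with
  | case1 l acc h h5 =>
    have P5 : PySem.List.pop? l (-5) =
        some (l.getD (l.length - 5) "", l.eraseIdx (l.length - 5)) := by
      have := pop?_neg_k l 5 (by omega) (by omega); simpa using this
    rw [P5] at h5; cases h5
  | case2 l acc h a l1 h5 h0 =>
    have hl1 := PySem.List.length_of_pop?_eq_some _ h5
    simp only at hl1
    have P0 := pop?_zero l1 (by omega)
    rw [P0] at h0; cases h0
  | case3 l acc h a l1 h5 b l2 h0 h1 =>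
    have hl1 := PySem.List.length_of_pop?_eq_some _ h5
    have hl2 := PySem.List.length_of_pop?_eq_some _ h0
    simp only at hl1 hl2
    have P1 : PySem.List.pop? l2 (-1) =
        some (l2.getD (l2.length - 1) "", l2.eraseIdx (l2.length - 1)) := by
      have := pop?_neg_k l2 1 (by omega) (by omega); simpa using this
    rw [show PySem.List.pop? l2 = PySem.List.pop? l2 (-1) from rfl, P1] at h1; cases h1
  | case4 l acc h a l1 h5 b l2 h0 c l3 h1 ih =>
    have hm : 6 ≤ l.length := by omega
    have P5 : PySem.List.pop? l (-5) =
        some (l.getD (l.length - 5) "", l.eraseIdx (l.length - 5)) := by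
      have := pop?_neg_k l 5 (by omega) (by omega); simpa using this
    have e5 := h5.symm.trans P5
    simp only [Option.some.injEq, Prod.mk.injEq] at e5
    obtain ⟨ha, hl1⟩ := e5
    have hl1len : l1.length = l.length - 1 := by
      have := PySem.List.length_of_pop?_eq_some _ h5; simp only at this; omega
    have e0 := h0.symm.trans (pop?_zero l1 (by omega))
    simp only [Option.some.injEq, Prod.mk.injEq] at e0
    obtain ⟨hb, hl2⟩ := e0
    have hl2len : l2.length = l.length - 2 := by
      have := PySem.List.length_of_pop?_eq_some _ h0; simp only at this; omega
    have P1 : PySem.List.pop? l2 (-1) =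
        some (l2.getD (l2.length - 1) "", l2.eraseIdx (l2.length - 1)) := by
      have := pop?_neg_k l2 1 (by omega) (by omega); simpa using this
    have e1 := h1.symm.trans P1
    simp only [Option.some.injEq, Prod.mk.injEq] at e1
    obtain ⟨hc, hl3⟩ := e1
    -- reduce one unfolding of the loop
    rw [wmLoop, dif_pos h, h5]; dsimp only
    rw [h0]; dsimp only
    rw [h1]; dsimp only
    rw [ih]
    have hle : (l.eraseIdx (l.length - 5)).length = l.length - 1 := by
      rw [List.length_eraseIdx, if_pos (by omega)]
    have hl2' : l2 = (l.eraseIdx (l.length - 5)).tail := by rw [hl2, hl1]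
    have hl3' : l3 = ((l.eraseIdx (l.length - 5)).tail).dropLast := by
      rw [hl3, hl2', List.eraseIdx_length_sub_one]
    -- the three popped values form B's triple of round 0
    have ea : a = l.getD (l.length - 5 - 2 * 0) "" := by rw [ha]; norm_num
    have eb : b = l.getD 0 "" := by
      rw [hb, hl1, List.getD_eq_getElem _ _ (by rw [hle]; omega), List.getElem_eraseIdx,
          dif_pos (by omega), List.getD_eq_getElem _ _ (by omega)]
    have ec : c = l.getD (l.length - 1 - 0) "" := by
      rw [hc, hl2', List.getD_eq_getElem _ _ (by rw [List.length_tail, hle]; omega),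
          List.getElem_tail, List.getElem_eraseIdx, dif_neg (by rw [List.length_tail, hle]; omega),
          List.getD_eq_getElem _ _ (by omega)]
      congr 1
      rw [List.length_tail, hle]
      omega
    have htrip : [a, b, c] = wmTriple l l.length 0 := by
      unfold wmTriple
      rw [if_pos (by omega), ← ea, ← eb, ← ec]
    rw [wmBody_step l hm, ← htrip, ← hl3']
    simp
  | case5 l acc h =>
    rw [wmLoop, dif_neg h, wmBody_nil l h]
    simp

-- ===== VERDICT (by name: the statement is the Claim_ definition above) =====
theorem word_mixer_spec : Claim_equal_word_mixer := by
  intro listt _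
  unfold Spec_word_mixer word_mixer
  rw [wmLoop_eq, alt_eq_wmBody, List.nil_append]
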